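-- pv_equiv track=rewrite | github.com/lear-711/Python_BI_2022 | HW_2.py | all_combinations_of_genotypes
-- ===== SOURCE A (Python) =====
-- import itertools
--
-- def upper_lower_change(result):
--
--     result_list = []
--     cnt = 0
--
--     for i in result:
--         i = list(i)
--         result_list.append(i)
--         if (i[0].islower() and i[1].isupper()):
--             result_list[cnt][0], result_list[cnt][1] = result_list[cnt][1], result_list[cnt][0]
--         cnt += 1
--
--     return result_list
--
-- def all_combinations_of_genotypes(parent_1, parent_2, test_genotype = None, target_genotype = None):
--
--     comb_dict = {}
--     cnt = 0
--     result_list = []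
--
--     for i in range(len(set(parent_1.lower()))):
--         comb_dict[i] = upper_lower_change(list(itertools.product(parent_1[cnt:cnt+2], parent_2[cnt:cnt+2])))
--         cnt += 2
--
--
--     result = itertools.product(*list(comb_dict.values()))
--
--     target_count = 0
--     total_count = 0
--     for i in result:
--         res = tuple(itertools.chain(*i))
--         res_string = ''.join(res)
--         if target_genotype:
--             total_count += 1
--             if target_genotype == res_string:
--                 target_count += 1
--         else:
--             if test_genotype:
--                 if test_genotype in res_string:
--                     result_list.append(res_string)
--             else:
--                 result_list.append(res_string)
--
--     if target_genotype:
--         return target_count, total_count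
--     return result_list
-- ===== SOURCE B (Python) =====
-- def all_combinations_of_genotypes(parent_1, parent_2, test_genotype=None, target_genotype=None):
--     # Build per-gene allele-pair options directly as 2-char strings.
--     n = len(set(parent_1.lower()))
--     genes = []
--     for g in range(n):
--         a = parent_1[2 * g:2 * g + 2]
--         b = parent_2[2 * g:2 * g + 2]
--         opts = []
--         for x in a:
--             for y in b:
--                 if x.islower() and y.isupper():
--                     opts.append(y + x)
--                 else:
--                     opts.append(x + y)
--         genes.append(opts)
--
--     total = 1
--     for opts in genes:
--         total *= len(opts)
--
--     def combination(k):
--         # mixed-radix decoding of index k (last gene varies fastest,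
--         # matching itertools.product order)
--         parts = []
--         rem = k
--         for opts in reversed(genes):
--             rem, d = divmod(rem, len(opts))
--             parts.append(opts[d])
--         return ''.join(reversed(parts))
--
--     if target_genotype:
--         target_count = sum(1 for k in range(total) if combination(k) == target_genotype)
--         return target_count, total
--
--     out = []
--     for k in range(total):
--         s = combination(k)
--         if (not test_genotype) or (test_genotype in s):
--             out.append(s)
--     return out
-- ===== Notes on version B (the rewrite author's own statement) =====
-- stated objective: alternative
-- what changed: B replaces A's dict-of-genes + itertools.product over char-pair lists (chain/join per combination) by building per-gene 2-char option strings directly and producing each combination by mixed-radix decoding of its index, in both the list and the counting modes.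
-- outside the precondition, e.g. on all_combinations_of_genotypes('Aa', 'Aa', None, 'AA'): A returns [1, 4], B returns [1, 4]
import Mathlib
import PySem

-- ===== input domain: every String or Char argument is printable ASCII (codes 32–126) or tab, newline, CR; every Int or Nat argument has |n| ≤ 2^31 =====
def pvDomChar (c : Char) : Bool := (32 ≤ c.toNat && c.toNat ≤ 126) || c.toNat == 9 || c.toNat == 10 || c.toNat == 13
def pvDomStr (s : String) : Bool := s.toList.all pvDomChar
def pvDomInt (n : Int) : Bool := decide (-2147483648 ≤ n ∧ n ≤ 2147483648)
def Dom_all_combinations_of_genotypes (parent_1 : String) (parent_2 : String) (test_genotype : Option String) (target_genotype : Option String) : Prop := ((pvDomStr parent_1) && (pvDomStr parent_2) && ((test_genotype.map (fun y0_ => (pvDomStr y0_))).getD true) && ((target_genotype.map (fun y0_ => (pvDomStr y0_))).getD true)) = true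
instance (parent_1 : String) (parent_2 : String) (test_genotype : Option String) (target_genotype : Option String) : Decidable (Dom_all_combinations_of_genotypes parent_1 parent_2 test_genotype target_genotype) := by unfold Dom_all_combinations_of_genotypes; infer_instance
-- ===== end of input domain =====

-- B replaces A's dict + itertools.product over char-pair lists by mixed-radix index
-- decoding of each combination (objective: alternative algorithm, same output order).

-- ===== PORT A =====

-- truthiness of an optional Python string: None and '' are falsy
def pvTruthy (o : Option String) : Bool :=
  match o with
  | none => false
  | some s => !(s.toList.isEmpty)

-- literal port of the helper: append each pair as a 2-element list, swapping in
-- place when the first char is lowercase and the second uppercase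
def upper_lower_change (result : List (Char × Char)) : List (List Char) :=
  result.foldl (fun result_list i =>
    result_list ++
      [if PySem.Chars.islower i.1 && PySem.Chars.isupper i.2 then [i.2, i.1] else [i.1, i.2]]) []

-- itertools.product(s1, s2) over two strings (as char lists)
def pyProduct2 (xs ys : List Char) : List (Char × Char) :=
  xs.flatMap (fun x => ys.map (fun y => (x, y)))

-- itertools.product(*lists)
def pyProductN {α : Type} (ls : List (List α)) : List (List α) :=
  match ls with
  | [] => [[]]
  | l :: rest => l.flatMap (fun x => (pyProductN rest).map (fun t => x :: t))

def all_combinations_of_genotypes (parent_1 : String) (parent_2 : String) (test_genotype : Option String) (target_genotype : Option String) : List String :=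
  let n := (PySem.Set.ofList (PySem.Str.lower parent_1).toList).length
  -- the loop filling comb_dict, carrying (comb_dict, cnt)
  let st := (PySem.List.pyRange 0 (n : Int) 1).foldl
      (fun (st : PySem.Dict Int (List (List Char)) × Int) i =>
        (st.1.insert i (upper_lower_change (pyProduct2
            (PySem.List.slice parent_1.toList (some st.2) (some (st.2 + 2)))
            (PySem.List.slice parent_2.toList (some st.2) (some (st.2 + 2))))),
         st.2 + 2))
      (PySem.Dict.empty, 0)
  let result := pyProductN st.1.values
  let result_list := result.foldl
      (fun result_list i =>
        let res := i.flatten            -- itertools.chain(*i)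
        let res_string := String.ofList res   -- ''.join(res)
        if pvTruthy target_genotype then
          -- counting branch: A returns a pair of ints here, not a value of the
          -- declared List String type; these inputs are excluded by Pre_
          result_list
        else if pvTruthy test_genotype then
          if PySem.Chars.isIn (test_genotype.getD "").toList res then
            result_list ++ [res_string]
          else result_list
        else result_list ++ [res_string]) []
  if pvTruthy target_genotype then [] else result_list

-- ===== PORT B =====

def all_combinations_of_genotypes_alt (parent_1 : String) (parent_2 : String) (test_genotype : Option String) (target_genotype : Option String) : List String :=
  let n := (PySem.Set.ofList (PySem.Str.lower parent_1).toList).length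
  -- per-gene lists of 2-char allele options (strings kept as char lists)
  let genes := (PySem.List.pyRange 0 (n : Int) 1).foldl
      (fun (genes : List (List (List Char))) g =>
        let a := PySem.List.slice parent_1.toList (some (2 * g)) (some (2 * g + 2))
        let b := PySem.List.slice parent_2.toList (some (2 * g)) (some (2 * g + 2))
        let opts := a.foldl (fun opts x =>
            b.foldl (fun opts y =>
              opts ++ [if PySem.Chars.islower x && PySem.Chars.isupper y then [y, x] else [x, y]]) opts) []
        genes ++ [opts]) []
  let total := genes.foldl (fun t opts => t * (opts.length : Int)) 1
  -- Source B's combination(k): mixed-radix decoding of index k, last gene fastest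
  let combination := fun (k : Int) =>
      let dec := genes.reverse.foldl
          (fun (st : Int × List (List Char)) opts =>
            (PySem.Int.floordiv st.1 (opts.length : Int),
             st.2 ++ [PySem.List.pyGetD opts (PySem.Int.mod st.1 (opts.length : Int)) []]))
          (k, [])
      dec.2.reverse.flatten              -- ''.join(reversed(parts))
  if pvTruthy target_genotype then
    -- counting branch: Source B returns (target_count, total), a pair of ints, not a
    -- value of the declared List String type; these inputs are excluded by Pre_
    []
  else
    (PySem.List.pyRange 0 total 1).foldl (fun out k =>
      let s := combination k
      if !(pvTruthy test_genotype) || PySem.Chars.isIn (test_genotype.getD "").toList s then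
        out ++ [String.ofList s]
      else out) []

-- ===== PRECONDITION & SPEC =====
-- Pre_ excludes a truthy (non-None, non-empty) target_genotype only because there
-- A returns a pair of ints (target_count, total_count), which is not a value of the
-- declared List-of-strings return type, so no claim typed List String can state it;
-- the Python B reproduces A's int pair exactly on those inputs.
def Pre_all_combinations_of_genotypes (parent_1 : String) (parent_2 : String) (test_genotype : Option String) (target_genotype : Option String) : Prop :=
  target_genotype = none ∨ target_genotype = some ""
instance (parent_1 : String) (parent_2 : String) (test_genotype : Option String) (target_genotype : Option String) : Decidable (Pre_all_combinations_of_genotypes parent_1 parent_2 test_genotype target_genotype) := by unfold Pre_all_combinations_of_genotypes; infer_instance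

def pvWitness_all_combinations_of_genotypes : String × String × Option String × Option String :=
  ("AaBb", "AaBb", some "a", none)

def Spec_all_combinations_of_genotypes (parent_1 : String) (parent_2 : String) (test_genotype : Option String) (target_genotype : Option String) (out : List String) : Prop := out = all_combinations_of_genotypes_alt parent_1 parent_2 test_genotype target_genotype
instance (parent_1 : String) (parent_2 : String) (test_genotype : Option String) (target_genotype : Option String) (out : List String) : Decidable (Spec_all_combinations_of_genotypes parent_1 parent_2 test_genotype target_genotype out) := by unfold Spec_all_combinations_of_genotypes; infer_instance

-- ===== CLAIM (what is proved, stated in full; the proofs are below) =====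
def Claim_equal_all_combinations_of_genotypes : Prop := ∀ (parent_1 : String) (parent_2 : String) (test_genotype : Option String) (target_genotype : Option String), Dom_all_combinations_of_genotypes parent_1 parent_2 test_genotype target_genotype → Pre_all_combinations_of_genotypes parent_1 parent_2 test_genotype target_genotype → Spec_all_combinations_of_genotypes parent_1 parent_2 test_genotype target_genotype (all_combinations_of_genotypes parent_1 parent_2 test_genotype target_genotype)

-- ===== LEMMAS AND PROOFS =====

def geneOf (cs1 cs2 : List Char) (g : Nat) : List (List Char) :=
  ((cs1.drop (2 * g)).take 2).flatMap (fun x =>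
    ((cs2.drop (2 * g)).take 2).map (fun y =>
      if PySem.Chars.islower x && PySem.Chars.isupper y then [y, x] else [x, y]))

lemma upper_lower_change_product (a b : List Char) :
    upper_lower_change (pyProduct2 a b)
      = a.flatMap (fun x => b.map (fun y =>
          if PySem.Chars.islower x && PySem.Chars.isupper y then [y, x] else [x, y])) := by
  unfold upper_lower_change pyProduct2
  rw [PySem.List.foldl_append_singleton_eq_map]
  simp [List.map_flatMap, List.map_map, Function.comp_def]
lemma slice_two (cs : List Char) (k : Nat) :
    PySem.List.slice cs (some (2 * (k:Int))) (some (2 * (k:Int) + 2)) = (cs.drop (2*k)).take 2 := by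
  rw [show (2 * (k:Int)) = ((2*k : Nat) : Int) by push_cast; ring]
  rw [show ((2*k : Nat) : Int) + 2 = ((2*k : Nat) : Int) + ((2:Nat) : Int) by norm_num]
  exact PySem.List.slice_natCast_add cs (2*k) 2

lemma opts_eq (cs1 cs2 : List Char) (k : Nat) :
    (let a := PySem.List.slice cs1 (some (2 * (k:Int))) (some (2 * (k:Int) + 2))
     let b := PySem.List.slice cs2 (some (2 * (k:Int))) (some (2 * (k:Int) + 2))
     a.foldl (fun opts x =>
        b.foldl (fun opts y =>
          opts ++ [if PySem.Chars.islower x && PySem.Chars.isupper y then [y, x] else [x, y]]) opts) [])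
    = geneOf cs1 cs2 k := by
  show (PySem.List.slice cs1 _ _).foldl _ [] = _
  rw [slice_two cs1 k, slice_two cs2 k]
  simp only [PySem.List.foldl_append_singleton_eq_map]
  rw [PySem.List.foldl_append_eq_flatMap]
  simp only [geneOf, List.nil_append]

lemma B_genes_fold (cs1 cs2 : List Char) (n : Nat) :
    ((PySem.List.pyRange 0 (n : Int) 1).foldl
      (fun (genes : List (List (List Char))) g =>
        let a := PySem.List.slice cs1 (some (2 * g)) (some (2 * g + 2))
        let b := PySem.List.slice cs2 (some (2 * g)) (some (2 * g + 2))
        let opts := a.foldl (fun opts x =>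
            b.foldl (fun opts y =>
              opts ++ [if PySem.Chars.islower x && PySem.Chars.isupper y then [y, x] else [x, y]]) opts) []
        genes ++ [opts]) [])
    = (List.range n).map (geneOf cs1 cs2) := by
  rw [PySem.List.foldl_append_singleton_eq_map]
  rw [PySem.List.pyRange_one]
  simp only [Int.sub_zero, Int.toNat_natCast, List.map_map]
  apply List.map_congr_left
  intro k _
  simpa using opts_eq cs1 cs2 k
lemma A_dict_fold (cs1 cs2 : List Char) (n : Nat) :
    ((PySem.List.pyRange 0 (n : Int) 1).foldl
      (fun (st : PySem.Dict Int (List (List Char)) × Int) i =>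
        (st.1.insert i (upper_lower_change (pyProduct2
            (PySem.List.slice cs1 (some st.2) (some (st.2 + 2)))
            (PySem.List.slice cs2 (some st.2) (some (st.2 + 2))))),
         st.2 + 2))
      (PySem.Dict.empty, 0))
    = (PySem.Dict.mk ((List.range n).map (fun g : Nat => ((g : Int), geneOf cs1 cs2 g))),
       (2 * n : Int)) := by
  induction n with
  | zero =>
      simp [PySem.List.pyRange_one_eq_nil, PySem.Dict.empty]
  | succ m ih =>
      have hr : PySem.List.pyRange 0 ((m+1 : Nat) : Int) 1
          = PySem.List.pyRange 0 (m : Nat) 1 ++ [(m : Int)] := by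
        rw [show ((m+1 : Nat) : Int) = (m : Int) + 1 by push_cast; ring]
        exact PySem.List.pyRange_one_succ_right (by positivity)
      rw [hr, List.foldl_append, ih]
      simp only [List.foldl_cons, List.foldl_nil]
      have hfresh : (PySem.Dict.mk ((List.range m).map (fun g : Nat => ((g : Int), geneOf cs1 cs2 g)))).contains (m : Int) = false := by
        simp [PySem.Dict.contains, List.any_eq_false]
        intro g hg
        omega
      have hins : ∀ (v : List (List Char)),
          (PySem.Dict.mk ((List.range m).map (fun g : Nat => ((g : Int), geneOf cs1 cs2 g)))).insert (m : Int) v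
          = PySem.Dict.mk ((List.range m).map (fun g : Nat => ((g : Int), geneOf cs1 cs2 g)) ++ [((m : Int), v)]) := by
        intro v
        simp [PySem.Dict.insert, hfresh]
      rw [hins]
      have hval : upper_lower_change (pyProduct2
            (PySem.List.slice cs1 (some (2 * (m:Int))) (some (2 * (m:Int) + 2)))
            (PySem.List.slice cs2 (some (2 * (m:Int))) (some (2 * (m:Int) + 2))))
          = geneOf cs1 cs2 m := by
        rw [slice_two cs1 m, slice_two cs2 m, upper_lower_change_product]
        simp only [geneOf]
      rw [hval, List.range_succ]
      refine Prod.ext ?_ (by push_cast; ring)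
      simp
lemma total_fold_eq {α : Type} (gs : List (List α)) (i : Int) :
    gs.foldl (fun t opts => t * (opts.length : Int)) i = i * (((gs.map List.length).prod : Nat) : Int) := by
  induction gs generalizing i with
  | nil => simp
  | cons g rest ih =>
      simp only [List.foldl_cons, List.map_cons, List.prod_cons, ih]
      push_cast; ring

lemma pyProductN_append_singleton {α : Type} (gs : List (List α)) (g : List α) :
    pyProductN (gs ++ [g]) = (pyProductN gs).flatMap (fun t => g.map (fun x => t ++ [x])) := by
  induction gs with
  | nil =>
      simp only [List.nil_append, pyProductN]
      simp only [List.flatMap_def, List.map_map, Function.comp_def, List.map_cons,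
        List.map_nil]
      induction g with
      | nil => rfl
      | cons x xs ihg => simp_all
  | cons l rest ih =>
      simp only [List.cons_append, pyProductN, ih]
      simp only [List.map_flatMap, List.flatMap_map, List.map_map, Function.comp_def,
        List.flatMap_assoc]
      simp [List.flatMap_def, List.map_map, Function.comp_def]

-- splitting the decode fold's parts accumulator off
lemma decode_fold_shift {α : Type} (dflt : α) (xs : List (List α)) :
    ∀ (k : Int) (l0 : List α),
    (xs.foldl
      (fun (st : Int × List α) opts =>
        (PySem.Int.floordiv st.1 (opts.length : Int),
         st.2 ++ [PySem.List.pyGetD opts (PySem.Int.mod st.1 (opts.length : Int)) dflt]))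
      (k, l0))
    = ((xs.foldl
      (fun (st : Int × List α) opts =>
        (PySem.Int.floordiv st.1 (opts.length : Int),
         st.2 ++ [PySem.List.pyGetD opts (PySem.Int.mod st.1 (opts.length : Int)) dflt]))
      (k, [])).1,
      l0 ++ (xs.foldl
      (fun (st : Int × List α) opts =>
        (PySem.Int.floordiv st.1 (opts.length : Int),
         st.2 ++ [PySem.List.pyGetD opts (PySem.Int.mod st.1 (opts.length : Int)) dflt]))
      (k, [])).2) := by
  induction xs with
  | nil => intro k l0; simp
  | cons o rest ih =>
      intro k l0
      simp only [List.foldl_cons, List.nil_append]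
      rw [ih (PySem.Int.floordiv k o.length)
            (l0 ++ [PySem.List.pyGetD o (PySem.Int.mod k o.length) dflt]),
          ih (PySem.Int.floordiv k o.length)
            [PySem.List.pyGetD o (PySem.Int.mod k o.length) dflt]]
      simp

def decodeParts {α : Type} (dflt : α) (gs : List (List α)) (k : Int) : List α :=
  ((gs.reverse.foldl
      (fun (st : Int × List α) opts =>
        (PySem.Int.floordiv st.1 (opts.length : Int),
         st.2 ++ [PySem.List.pyGetD opts (PySem.Int.mod st.1 (opts.length : Int)) dflt]))
      (k, [])).2).reverse

lemma decodeParts_append {α : Type} (dflt : α) (gs : List (List α)) (g : List α) (k : Int) :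
    decodeParts dflt (gs ++ [g]) k
      = decodeParts dflt gs (PySem.Int.floordiv k (g.length : Int))
        ++ [PySem.List.pyGetD g (PySem.Int.mod k (g.length : Int)) dflt] := by
  unfold decodeParts
  rw [List.reverse_append]
  simp only [List.reverse_singleton, List.singleton_append, List.foldl_cons]
  rw [decode_fold_shift]
  simp

lemma range_mul_split {β : Type} (N m : Nat) (f : Nat → β) :
    (List.range (N * m)).map f
      = (List.range N).flatMap (fun q => (List.range m).map (fun d => f (q * m + d))) := by
  induction N with
  | zero => simp
  | succ n ih =>
      rw [Nat.succ_mul, List.range_add, List.map_append, ih, List.range_succ]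
      simp [List.map_map, Function.comp_def]

lemma map_getD_range {α β : Type} (g : List α) (dflt : α) (h : α → β) :
    (List.range g.length).map (fun d => h (g.getD d dflt)) = g.map h := by
  apply List.ext_getElem
  · simp
  · intro i h1 h2
    simp [List.getD_eq_getElem?_getD, List.getElem?_eq_getElem (by simpa using h1)]

lemma decode_enumerates {α : Type} (dflt : α) (gs : List (List α)) :
    (PySem.List.pyRange 0 (((gs.map List.length).prod : Nat) : Int) 1).map (decodeParts dflt gs)
      = pyProductN gs := by
  induction gs using List.reverseRecOn with
  | nil =>
      simp [PySem.List.pyRange_one, pyProductN, decodeParts, List.range_succ]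
  | append_singleton init g ih =>
      rw [pyProductN_append_singleton, ← ih]
      rw [PySem.List.pyRange_one, PySem.List.pyRange_one]
      simp only [Int.sub_zero, Int.toNat_natCast, List.map_map, Function.comp_def]
      have hT : ((init ++ [g]).map List.length).prod = (init.map List.length).prod * g.length := by
        simp
      rw [hT]
      rw [range_mul_split ((init.map List.length).prod) g.length
            (fun k => decodeParts dflt (init ++ [g]) ((0:Int) + (k:Int)))]
      rw [List.flatMap_map]
      apply List.flatMap_congr
      intro q _
      rw [← map_getD_range g dflt (fun x => decodeParts dflt init ((0:Int) + (q:Int)) ++ [x])]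
      apply List.map_congr_left
      intro d hd
      have hm : 0 < g.length := by
        rcases List.mem_range.mp hd with h; omega
      have hdm : d < g.length := List.mem_range.mp hd
      rw [show ((0:Int) + ((q * g.length + d : Nat) : Int)) = ((q * g.length + d : Nat) : Int) by ring]
      rw [decodeParts_append]
      rw [PySem.Int.floordiv_natCast, PySem.Int.mod_natCast]
      have hdiv : (q * g.length + d) / g.length = q := by
        rw [Nat.add_comm, Nat.add_mul_div_right _ _ hm, Nat.div_eq_of_lt hdm]; omega
      have hmod : (q * g.length + d) % g.length = d := by
        rw [Nat.add_comm, Nat.add_mul_mod_self_right, Nat.mod_eq_of_lt hdm]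
      rw [hdiv, hmod]
      rw [PySem.List.pyGetD_natCast]
      simp
def keepStr (test : Option String) (cs : List Char) : Bool :=
  !(pvTruthy test) || PySem.Chars.isIn (test.getD "").toList cs

theorem ports_agree (p1 p2 : String) (test target : Option String)
    (h : pvTruthy target = false) :
    all_combinations_of_genotypes p1 p2 test target
      = all_combinations_of_genotypes_alt p1 p2 test target := by
  unfold all_combinations_of_genotypes all_combinations_of_genotypes_alt
  simp only [h, Bool.false_eq_true, if_false]
  rw [A_dict_fold p1.toList p2.toList, B_genes_fold p1.toList p2.toList]
  set n := (PySem.Set.ofList (PySem.Str.lower p1).toList).length with hn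
  set gs := (List.range n).map (geneOf p1.toList p2.toList) with hgs
  have hvals : (PySem.Dict.mk ((List.range n).map (fun g : Nat => ((g : Int), geneOf p1.toList p2.toList g)))).values = gs := by
    simp [PySem.Dict.values, List.map_map, Function.comp_def, hgs]
  rw [hvals]
  rw [total_fold_eq gs 1, one_mul]
  -- rewrite A's loop body
  have hA : (fun (result_list : List String) (i : List (List Char)) =>
        if pvTruthy test = true then
          if PySem.Chars.isIn (test.getD "").toList i.flatten = true then
            result_list ++ [String.ofList i.flatten] else result_list
        else result_list ++ [String.ofList i.flatten])
      = (fun out i => if keepStr test i.flatten then out ++ [String.ofList i.flatten] else out) := by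
    funext out i
    cases h2 : pvTruthy test <;> simp [h2, keepStr]
  -- rewrite B's loop body through decodeParts
  have hB : (fun (out : List String) (k : Int) =>
        let s := ((gs.reverse.foldl
          (fun (st : Int × List (List Char)) opts =>
            (PySem.Int.floordiv st.1 (opts.length : Int),
             st.2 ++ [PySem.List.pyGetD opts (PySem.Int.mod st.1 (opts.length : Int)) []]))
          (k, [])).2).reverse.flatten
        if !(pvTruthy test) || PySem.Chars.isIn (test.getD "").toList s then
          out ++ [String.ofList s]
        else out)
      = (fun out k => if keepStr test (decodeParts [] gs k).flatten then
          out ++ [String.ofList (decodeParts [] gs k).flatten] else out) := by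
    funext out k
    simp only [decodeParts, keepStr]
  simp only [hA, hB]
  have hfm := List.foldl_map (f := decodeParts ([] : List Char) gs)
      (g := fun (out : List String) (s : List (List Char)) =>
        if keepStr test s.flatten = true then out ++ [String.ofList s.flatten] else out)
      (l := PySem.List.pyRange 0 (((gs.map List.length).prod : Nat) : Int) 1)
      (init := ([] : List String))
  rw [← hfm, decode_enumerates]

-- ===== VERDICT (by name: the statement is the Claim_ definition above) =====
theorem all_combinations_of_genotypes_spec : Claim_equal_all_combinations_of_genotypes := by
  intro p1 p2 test target _ hpre
  unfold Spec_all_combinations_of_genotypes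
  have h : pvTruthy target = false := by
    rcases hpre with h | h <;> subst h <;> decide
  exact ports_agree p1 p2 test target h
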